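-- pv_equiv track=rewrite | github.com/oracle/oci-python-sdk | examples/showoci/showoci.py | summery_group_by
-- ===== SOURCE A (Python) =====
-- def summery_group_by(key, list_of_dicts):
--     d = {}
--     for dct in list_of_dicts:
--         if dct[key] not in d:
--             d[dct[key]] = {}
--         for k, v in dct.items():
--             if k != key:
--                 if k not in d[dct[key]]:
--                     d[dct[key]][k] = v
--                 else:
--                     d[dct[key]][k] += v
--     final_list = []
--     for k, v in d.items():
--         temp_d = {key: k}
--         for k2, v2 in v.items():
--             temp_d[k2] = v2
--         final_list.append(temp_d)
--     return final_list
-- ===== SOURCE B (Python) =====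
-- def summery_group_by(key, list_of_dicts):
--     # Stage 1: distinct key values in first-seen order.
--     order = []
--     for dct in list_of_dicts:
--         if dct[key] not in order:
--             order.append(dct[key])
--     # Stage 2: for each group value, rescan the whole list and sum its fields.
--     result = []
--     for kv in order:
--         temp = {key: kv}
--         for dct in list_of_dicts:
--             if dct[key] == kv:
--                 for k, v in dct.items():
--                     if k != key:
--                         temp[k] = temp.get(k, 0) + v
--         result.append(temp)
--     return result
-- ===== Notes on version B (the rewrite author's own statement) =====
-- stated objective: alternative
-- what changed: B replaces A's incremental dict-of-dicts grouping (one pass building nested accumulators, then a reconstruction pass) by a staged brute-force: first collect the distinct key values in first-seen order, then for each group value rescan the whole list and sum that group's fields directly into its output dict; it trades A's single grouping pass for g+1 simple scans with no nested dict structure.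
import Mathlib
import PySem

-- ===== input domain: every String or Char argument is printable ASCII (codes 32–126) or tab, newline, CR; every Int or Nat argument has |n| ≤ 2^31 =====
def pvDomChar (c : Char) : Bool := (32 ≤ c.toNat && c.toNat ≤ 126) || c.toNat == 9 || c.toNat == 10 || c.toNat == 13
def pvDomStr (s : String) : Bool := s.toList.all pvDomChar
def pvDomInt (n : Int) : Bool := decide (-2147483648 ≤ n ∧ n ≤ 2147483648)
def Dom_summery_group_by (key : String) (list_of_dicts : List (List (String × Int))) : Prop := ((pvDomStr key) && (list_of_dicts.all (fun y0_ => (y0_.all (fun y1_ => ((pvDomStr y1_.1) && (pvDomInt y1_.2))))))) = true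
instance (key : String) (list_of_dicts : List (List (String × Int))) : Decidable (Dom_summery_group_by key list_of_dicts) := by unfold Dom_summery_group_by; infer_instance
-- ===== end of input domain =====

-- B replaces A's incremental dict-of-dicts grouping (accumulate, then reconstruct) by a
-- staged brute-force: collect distinct key values first, then one rescan of the whole list
-- per group summing its fields directly into the output dict (objective: alternative, no speed claim).

-- ===== PORT A =====
-- each inner assoc list encodes a Python dict; PySem.Dict.ofList is that decoding
-- body of A's inner `for k, v in dct.items()` loop
def pvAInner (key : String) (kv : Int) (d : PySem.Dict Int (PySem.Dict String Int))
    (p : String × Int) : PySem.Dict Int (PySem.Dict String Int) :=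
  if p.1 ≠ key then
    let m := d.getD kv PySem.Dict.empty
    let m := if m.contains p.1 then m.insert p.1 (m.getD p.1 0 + p.2) else m.insert p.1 p.2
    d.insert kv m
  else d

-- body of A's outer `for dct in list_of_dicts` loop
def pvAStep (key : String) (d : PySem.Dict Int (PySem.Dict String Int))
    (dct0 : List (String × Int)) : PySem.Dict Int (PySem.Dict String Int) :=
  let dct := PySem.Dict.ofList dct0
  let kv := dct.getD key 0            -- dct[key]; Pre_ excludes the KeyError case
  let d := if d.contains kv then d else d.insert kv PySem.Dict.empty
  dct.items.foldl (pvAInner key kv) d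

def summery_group_by (key : String) (list_of_dicts : List (List (String × Int))) : List (List (String × Int)) :=
  let d := list_of_dicts.foldl (pvAStep key) PySem.Dict.empty
  d.items.foldl (fun fl p =>
    fl ++ [(p.2.items.foldl (fun t q => t.insert q.1 q.2) (PySem.Dict.empty.insert key p.1)).items]) []

-- ===== PORT B =====
-- body of B's `for k, v in dct.items()` loop: temp[k] = temp.get(k, 0) + v
def pvBInner (key : String) (t : PySem.Dict String Int) (p : String × Int) : PySem.Dict String Int :=
  if p.1 ≠ key then t.insert p.1 (t.getD p.1 0 + p.2) else t

-- body of B's rescan `for dct in list_of_dicts` loop inside a group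
def pvBScan (key : String) (kv : Int) (t : PySem.Dict String Int)
    (dct0 : List (String × Int)) : PySem.Dict String Int :=
  let dct := PySem.Dict.ofList dct0
  if dct.getD key 0 == kv then dct.items.foldl (pvBInner key) t else t

def summery_group_by_alt (key : String) (list_of_dicts : List (List (String × Int))) : List (List (String × Int)) :=
  let order : List Int := list_of_dicts.foldl (fun order dct0 =>
    let kv := (PySem.Dict.ofList dct0).getD key 0    -- dct[key]; Pre_ excludes the KeyError case
    if order.contains kv then order else order ++ [kv]) []
  order.foldl (fun result kv =>
    result ++ [(list_of_dicts.foldl (pvBScan key kv) (PySem.Dict.empty.insert key kv)).items]) []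

-- ===== PRECONDITION & SPEC =====
-- Pre_ excludes exactly the inputs where Python A raises KeyError: some dict lacks `key`.
def Pre_summery_group_by (key : String) (list_of_dicts : List (List (String × Int))) : Prop :=
  ∀ dct ∈ list_of_dicts, key ∈ dct.map Prod.fst
instance (key : String) (list_of_dicts : List (List (String × Int))) : Decidable (Pre_summery_group_by key list_of_dicts) := by unfold Pre_summery_group_by; infer_instance
def pvWitness_summery_group_by : String × (List (List (String × Int))) :=
  ("id", [[("id", 1), ("x", 2)], [("id", 1), ("x", 3), ("y", -1)], [("id", 2)]])
def Spec_summery_group_by (key : String) (list_of_dicts : List (List (String × Int))) (out : List (List (String × Int))) : Prop := out = summery_group_by_alt key list_of_dicts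
instance (key : String) (list_of_dicts : List (List (String × Int))) (out : List (List (String × Int))) : Decidable (Spec_summery_group_by key list_of_dicts out) := by unfold Spec_summery_group_by; infer_instance

-- ===== CLAIM (what is proved, stated in full; the proofs are below) =====
def Claim_equal_summery_group_by : Prop := ∀ (key : String) (list_of_dicts : List (List (String × Int))), Dom_summery_group_by key list_of_dicts → Pre_summery_group_by key list_of_dicts → Spec_summery_group_by key list_of_dicts (summery_group_by key list_of_dicts)

-- ===== LEMMAS AND PROOFS =====

-- dct[key] of an encoded dict
def pvKey (key : String) (dct0 : List (String × Int)) : Int :=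
  (PySem.Dict.ofList dct0).getD key 0

-- accumulating one dict's non-key fields into a group accumulator
def pvG (key : String) (m : PySem.Dict String Int) (dct0 : List (String × Int)) : PySem.Dict String Int :=
  (PySem.Dict.ofList dct0).items.foldl (pvBInner key) m

-- the distinct key values of lod not already in `seen`, in first-seen order
def pvSeen (key : String) : List (List (String × Int)) → List Int → List Int
  | [], _ => []
  | dct0 :: t, seen =>
    if seen.contains (pvKey key dct0) then pvSeen key t seen
    else pvKey key dct0 :: pvSeen key t (seen ++ [pvKey key dct0])

lemma pvSeen_nil (key : String) (seen : List Int) : pvSeen key [] seen = [] := rfl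

lemma pvSeen_cons (key : String) (dct0 : List (String × Int)) (t : List (List (String × Int)))
    (seen : List Int) :
    pvSeen key (dct0 :: t) seen =
      if seen.contains (pvKey key dct0) then pvSeen key t seen
      else pvKey key dct0 :: pvSeen key t (seen ++ [pvKey key dct0]) := rfl

-- the accumulator of group kv over lod, started from m
def pvAcc (key : String) (kv : Int) (lod : List (List (String × Int))) (m : PySem.Dict String Int) : PySem.Dict String Int :=
  (lod.filter (fun dct0 => pvKey key dct0 == kv)).foldl (pvG key) m

lemma pv_updA_eq (m : PySem.Dict String Int) (k : String) (v : Int) :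
    (if m.contains k then m.insert k (m.getD k 0 + v) else m.insert k v) =
      m.insert k (m.getD k 0 + v) := by
  by_cases h : m.contains k = true
  · simp [h]
  · rw [PySem.Dict.getD_of_not_contains m 0 (by simpa using h), zero_add]
    simp [h]

lemma pv_contains_keys (d : PySem.Dict Int (PySem.Dict String Int)) (kv : Int) :
    d.keys.contains kv = d.contains kv := by
  by_cases h : d.contains kv = true
  · simp [(PySem.Dict.contains_iff_mem_keys d kv).mp h, h]
  · have h' : ¬ kv ∈ d.keys := fun hm => h ((PySem.Dict.contains_iff_mem_keys d kv).mpr hm)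
    simp only [Bool.not_eq_true] at h
    simp [h', h]

lemma pv_insert_getD_self {κ ν : Type} [BEq κ] [LawfulBEq κ] (d : PySem.Dict κ ν) (k : κ)
    (dflt : ν) (hc : d.contains k = true) (hnd : d.keys.Nodup) :
    d.insert k (d.getD k dflt) = d := by
  apply PySem.Dict.ext
  rw [PySem.Dict.items_insert_of_contains d _ hc]
  conv_rhs => rw [← List.map_id d.items]
  apply List.map_congr_left
  intro p hp
  by_cases hb : (p.1 == k) = true
  · have h1 : p.1 = k := eq_of_beq hb
    have hmem : (k, p.2) ∈ d.items := by rw [← h1]; exact hp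
    have hv : d.getD k dflt = p.2 := PySem.Dict.getD_of_mem_items d hmem hnd _
    simp only [hb, if_true, hv, id_eq]
    rw [← h1]
  · simp [hb]

-- A's inner loop over one dict's items collapses to a single insert of the group accumulator
lemma pv_innerA (key : String) (kv : Int) (items : List (String × Int)) :
    ∀ d : PySem.Dict Int (PySem.Dict String Int), d.contains kv = true → d.keys.Nodup →
      items.foldl (pvAInner key kv) d =
        d.insert kv (items.foldl (pvBInner key) (d.getD kv PySem.Dict.empty)) := by
  induction items with
  | nil =>
    intro d hc hnd
    simp [pv_insert_getD_self d kv PySem.Dict.empty hc hnd]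
  | cons p t ih =>
    intro d hc hnd
    by_cases hk : p.1 = key
    · simp only [List.foldl_cons, pvAInner, pvBInner, hk, ne_eq, not_true_eq_false, if_false]
      exact ih d hc hnd
    · simp only [List.foldl_cons, pvAInner, pvBInner, ne_eq, hk, not_false_eq_true, if_true]
      rw [pv_updA_eq]
      rw [ih _ (PySem.Dict.contains_insert_self d kv _) (PySem.Dict.nodup_keys_insert d kv _ hnd)]
      rw [PySem.Dict.getD_insert_self, PySem.Dict.insert_insert_self]

lemma pv_stepA (key : String) (d : PySem.Dict Int (PySem.Dict String Int))
    (dct0 : List (String × Int)) (hnd : d.keys.Nodup) :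
    pvAStep key d dct0 = d.insert (pvKey key dct0) (pvG key (d.getD (pvKey key dct0) PySem.Dict.empty) dct0) := by
  unfold pvAStep pvG pvKey
  by_cases hc : d.contains ((PySem.Dict.ofList dct0).getD key 0) = true
  · simp only [hc, if_true]
    exact pv_innerA key _ _ d hc hnd
  · simp only [hc, Bool.false_eq_true, if_false]
    rw [pv_innerA key _ _ _ (PySem.Dict.contains_insert_self d _ _) (PySem.Dict.nodup_keys_insert d _ _ hnd)]
    rw [PySem.Dict.getD_insert_self, PySem.Dict.insert_insert_self,
        PySem.Dict.getD_of_not_contains d PySem.Dict.empty (by simpa using hc)]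

lemma pv_seen_not_mem (key : String) :
    ∀ (lod : List (List (String × Int))) (seen : List Int) (x : Int),
      x ∈ pvSeen key lod seen → seen.contains x = false := by
  intro lod
  induction lod with
  | nil => intro seen x h; simp [pvSeen_nil] at h
  | cons dct0 t ih =>
    intro seen x h
    rw [pvSeen_cons] at h
    by_cases hc : seen.contains (pvKey key dct0) = true
    · rw [if_pos hc] at h; exact ih seen x h
    · rw [if_neg (by simpa using hc)] at h
      rw [List.mem_cons] at h
      rcases h with h | h
      · rw [← h] at hc; simpa using hc
      · have := ih _ x h
        simp only [List.contains_append, Bool.or_eq_false_iff] at this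
        exact this.1

-- A's grouping loop characterised: existing entries accumulate, new groups append in first-seen order
lemma pv_outerA (key : String) :
    ∀ (lod : List (List (String × Int))) (d : PySem.Dict Int (PySem.Dict String Int)),
      d.keys.Nodup →
      (lod.foldl (pvAStep key) d).items =
        d.items.map (fun p => (p.1, pvAcc key p.1 lod p.2)) ++
          (pvSeen key lod d.keys).map (fun kv => (kv, pvAcc key kv lod PySem.Dict.empty)) := by
  intro lod
  induction lod with
  | nil =>
    intro d _
    simp [pvSeen_nil, pvAcc]
  | cons dct0 t ih =>
    intro d hnd
    have hstep := pv_stepA key d dct0 hnd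
    by_cases hc : d.contains (pvKey key dct0) = true
    · -- existing group
      have hnd2 : (d.insert (pvKey key dct0) (pvG key (d.getD (pvKey key dct0) PySem.Dict.empty) dct0)).keys.Nodup :=
        PySem.Dict.nodup_keys_insert d _ _ hnd
      have hkeys : (d.insert (pvKey key dct0) (pvG key (d.getD (pvKey key dct0) PySem.Dict.empty) dct0)).keys = d.keys :=
        PySem.Dict.keys_insert_of_contains d _ hc
      simp only [List.foldl_cons, hstep]
      rw [ih _ hnd2, hkeys]
      congr 1
      · rw [PySem.Dict.items_insert_of_contains d _ hc, List.map_map]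
        apply List.map_congr_left
        intro p hp
        by_cases hb : (p.1 == pvKey key dct0) = true
        · have h1 : p.1 = pvKey key dct0 := eq_of_beq hb
          have hmem : (pvKey key dct0, p.2) ∈ d.items := by rw [← h1]; exact hp
          have hgd : d.getD (pvKey key dct0) PySem.Dict.empty = p.2 :=
            PySem.Dict.getD_of_mem_items d hmem hnd _
          simp only [Function.comp_apply, hb, if_true]
          unfold pvAcc
          rw [List.filter_cons, if_pos (by simp [← h1])]
          simp only [List.foldl_cons]
          rw [hgd, ← h1]
        · simp only [Function.comp_apply, hb, Bool.false_eq_true, if_false]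
          unfold pvAcc
          rw [List.filter_cons, if_neg ?_]
          have h1 : ¬ pvKey key dct0 = p.1 := fun h => by simp [h] at hb
          simpa using h1
      · rw [pvSeen_cons, if_pos (by rw [pv_contains_keys]; exact hc)]
        apply List.map_congr_left
        intro kv' hkv'
        have hnm := pv_seen_not_mem key t d.keys kv' hkv'
        have hne : ¬ pvKey key dct0 = kv' := by
          intro h
          rw [h] at hc
          rw [← pv_contains_keys, hnm] at hc
          exact Bool.false_ne_true hc
        unfold pvAcc
        rw [List.filter_cons, if_neg (by simpa using hne)]
    · -- new group
      have hc' : d.contains (pvKey key dct0) = false := by simpa using hc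
      have hnd2 : (d.insert (pvKey key dct0) (pvG key (d.getD (pvKey key dct0) PySem.Dict.empty) dct0)).keys.Nodup :=
        PySem.Dict.nodup_keys_insert d _ _ hnd
      have hkeys : (d.insert (pvKey key dct0) (pvG key (d.getD (pvKey key dct0) PySem.Dict.empty) dct0)).keys = d.keys ++ [pvKey key dct0] :=
        PySem.Dict.keys_insert_of_not_contains d _ hc'
      simp only [List.foldl_cons, hstep]
      rw [ih _ hnd2, hkeys]
      rw [PySem.Dict.items_insert_of_not_contains d _ hc']
      rw [pvSeen_cons, if_neg (by rw [pv_contains_keys, hc']; simp)]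
      simp only [List.map_append, List.map_cons, List.map_nil, List.append_assoc,
        List.cons_append, List.nil_append]
      congr 1
      · apply List.map_congr_left
        intro p hp
        have hne : ¬ pvKey key dct0 = p.1 := by
          intro h
          have hcp : d.contains p.1 = true := by
            simp only [PySem.Dict.contains]
            exact List.any_eq_true.mpr ⟨p, hp, by simp⟩
          rw [← h, hc'] at hcp
          exact Bool.false_ne_true hcp
        unfold pvAcc
        rw [List.filter_cons, if_neg (by simpa using hne)]
      · congr 1
        · -- head: the new group's accumulator starts with this dict
          have hgd : d.getD (pvKey key dct0) PySem.Dict.empty = PySem.Dict.empty :=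
            PySem.Dict.getD_of_not_contains d PySem.Dict.empty hc'
          unfold pvAcc
          rw [List.filter_cons, if_pos (by simp), hgd]
          simp only [List.foldl_cons]
        · apply List.map_congr_left
          intro kv' hkv'
          have hnm := pv_seen_not_mem key t (d.keys ++ [pvKey key dct0]) kv' hkv'
          simp only [List.contains_append, Bool.or_eq_false_iff] at hnm
          have hne : ¬ pvKey key dct0 = kv' := by
            intro h
            have := hnm.2
            simp [h] at this
          unfold pvAcc
          rw [List.filter_cons, if_neg (by simpa using hne)]

-- B's seen-collection loop computes pvSeen
lemma pv_order (key : String) :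
    ∀ (lod : List (List (String × Int))) (seen : List Int),
      lod.foldl (fun order dct0 =>
        let kv := (PySem.Dict.ofList dct0).getD key 0
        if order.contains kv then order else order ++ [kv]) seen =
      seen ++ pvSeen key lod seen := by
  intro lod
  induction lod with
  | nil => intro seen; simp [pvSeen_nil]
  | cons dct0 t ih =>
    intro seen
    simp only [List.foldl_cons]
    rw [pvSeen_cons]
    by_cases hc : seen.contains (pvKey key dct0) = true
    · rw [if_pos hc]
      have hc' : seen.contains ((PySem.Dict.ofList dct0).getD key 0) = true := hc
      simp only [hc', if_true]
      exact ih seen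
    · rw [if_neg (by simpa using hc)]
      have hc' : seen.contains ((PySem.Dict.ofList dct0).getD key 0) = false := by simpa using hc
      rw [if_neg hc, ih (seen ++ [(PySem.Dict.ofList dct0).getD key 0])]
      simp [pvKey]

-- B's guarded rescan is the fold of pvG over the filtered list
lemma pv_scan_filter (key : String) (kv : Int) :
    ∀ (lod : List (List (String × Int))) (t : PySem.Dict String Int),
      lod.foldl (pvBScan key kv) t =
        (lod.filter (fun dct0 => pvKey key dct0 == kv)).foldl (pvG key) t := by
  intro lod
  induction lod with
  | nil => intro t; rfl
  | cons dct0 l ih =>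
    intro t
    simp only [List.foldl_cons, List.filter_cons, pvBScan, pvKey]
    by_cases h : ((PySem.Dict.ofList dct0).getD key 0 == kv) = true
    · simp only [h, if_true, List.foldl_cons]
      exact ih _
    · simp only [h, Bool.false_eq_true, if_false]
      exact ih t

lemma pv_insert_cons_ne (k0 : String) (v0 : Int) (rest : List (String × Int)) (k : String)
    (v : Int) (h : (k0 == k) = false) :
    (PySem.Dict.mk ((k0, v0) :: rest)).insert k v =
      PySem.Dict.mk ((k0, v0) :: ((PySem.Dict.mk rest).insert k v).items) := by
  unfold PySem.Dict.insert PySem.Dict.contains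
  simp only [List.any_cons, h, Bool.false_or]
  have hne : ¬ k0 = k := by simpa using h
  by_cases hc : (rest.any fun p => p.1 == k) = true
  · simp [hc, hne]
  · simp [hc]

lemma pv_getD_cons_ne (k0 : String) (v0 : Int) (rest : List (String × Int)) (k : String)
    (dflt : Int) (h : (k0 == k) = false) :
    (PySem.Dict.mk ((k0, v0) :: rest)).getD k dflt = (PySem.Dict.mk rest).getD k dflt := by
  simp [PySem.Dict.getD, PySem.Dict.get?_mk_cons, h]

-- pvBInner commutes with prepending the (key, kv) head
lemma pv_binner_cons (key : String) (kv : Int) (m : PySem.Dict String Int) (p : String × Int) :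
    pvBInner key (PySem.Dict.mk ((key, kv) :: m.items)) p =
      PySem.Dict.mk ((key, kv) :: (pvBInner key m p).items) := by
  unfold pvBInner
  by_cases hk : p.1 = key
  · simp [hk]
  · have hb : (key == p.1) = false := by simpa using fun h : key = p.1 => hk h.symm
    simp only [ne_eq, hk, not_false_eq_true, if_true]
    rw [pv_getD_cons_ne key kv m.items p.1 0 hb, pv_insert_cons_ne key kv m.items p.1 _ hb]

lemma pv_g_cons (key : String) (kv : Int) (dct0 : List (String × Int)) :
    ∀ m : PySem.Dict String Int,
      pvG key (PySem.Dict.mk ((key, kv) :: m.items)) dct0 =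
        PySem.Dict.mk ((key, kv) :: (pvG key m dct0).items) := by
  unfold pvG
  induction (PySem.Dict.ofList dct0).items with
  | nil => intro m; rfl
  | cons p l ih =>
    intro m
    simp only [List.foldl_cons, pv_binner_cons]
    exact ih (pvBInner key m p)

lemma pv_acc_cons (key : String) (kv : Int) :
    ∀ (l : List (List (String × Int))) (m : PySem.Dict String Int),
      l.foldl (pvG key) (PySem.Dict.mk ((key, kv) :: m.items)) =
        PySem.Dict.mk ((key, kv) :: (l.foldl (pvG key) m).items) := by
  intro l
  induction l with
  | nil => intro m; rfl
  | cons dct0 t ih =>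
    intro m
    simp only [List.foldl_cons, pv_g_cons]
    exact ih (pvG key m dct0)

-- the group accumulator never holds the key field and keeps its keys distinct
lemma pv_binner_inv (key : String) (m : PySem.Dict String Int) (p : String × Int)
    (h1 : m.contains key = false) (h2 : m.keys.Nodup) :
    (pvBInner key m p).contains key = false ∧ (pvBInner key m p).keys.Nodup := by
  unfold pvBInner
  by_cases hk : p.1 = key
  · simp [hk, h1, h2]
  · have hb : (key == p.1) = false := by simpa using fun h : key = p.1 => hk h.symm
    simp only [ne_eq, hk, not_false_eq_true, if_true]
    constructor
    · rw [PySem.Dict.contains_insert]; simp [hb, h1]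
    · exact PySem.Dict.nodup_keys_insert m p.1 _ h2

lemma pv_g_inv (key : String) (dct0 : List (String × Int)) :
    ∀ m : PySem.Dict String Int, m.contains key = false → m.keys.Nodup →
      (pvG key m dct0).contains key = false ∧ (pvG key m dct0).keys.Nodup := by
  unfold pvG
  induction (PySem.Dict.ofList dct0).items with
  | nil => intro m h1 h2; exact ⟨h1, h2⟩
  | cons p l ih =>
    intro m h1 h2
    simp only [List.foldl_cons]
    obtain ⟨h1', h2'⟩ := pv_binner_inv key m p h1 h2
    exact ih _ h1' h2'

lemma pv_acc_inv (key : String) :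
    ∀ (l : List (List (String × Int))) (m : PySem.Dict String Int),
      m.contains key = false → m.keys.Nodup →
      (l.foldl (pvG key) m).contains key = false ∧ (l.foldl (pvG key) m).keys.Nodup := by
  intro l
  induction l with
  | nil => intro m h1 h2; exact ⟨h1, h2⟩
  | cons dct0 t ih =>
    intro m h1 h2
    simp only [List.foldl_cons]
    obtain ⟨h1', h2'⟩ := pv_g_inv key dct0 m h1 h2
    exact ih _ h1' h2'

-- A's reconstruction of one group's output dict
lemma pv_rebuild (key : String) (kv : Int) (m : PySem.Dict String Int)
    (h1 : m.contains key = false) (h2 : m.keys.Nodup) :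
    (m.items.foldl (fun t q => t.insert q.1 q.2) (PySem.Dict.empty.insert key kv)).items =
      (key, kv) :: m.items := by
  have hfresh : ∀ a ∈ m.items, (PySem.Dict.empty.insert key kv).contains a.1 = false := by
    intro a ha
    have hne : ¬ a.1 = key := by
      simp only [PySem.Dict.contains, List.any_eq_false] at h1
      intro he; exact (h1 a ha) (by simp [he])
    have hb : (key == a.1) = false := by simpa using fun h : key = a.1 => hne h.symm
    simp [PySem.Dict.contains, PySem.Dict.insert, PySem.Dict.empty, hb]
  have hnd : (m.items.map (fun q : String × Int => q.1)).Nodup := by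
    simpa [PySem.Dict.keys] using h2
  rw [PySem.Dict.items_foldl_insert_fresh m.items (fun q => q.1) (fun q => q.2) _ hfresh hnd]
  simp [PySem.Dict.insert, PySem.Dict.contains, PySem.Dict.empty]

-- ===== VERDICT (by name: the statement is the Claim_ definition above) =====
theorem summery_group_by_spec : Claim_equal_summery_group_by := by
  intro key lod _ _
  unfold Spec_summery_group_by summery_group_by summery_group_by_alt
  rw [PySem.List.foldl_append_singleton_eq_map, PySem.List.foldl_append_singleton_eq_map]
  have hkeys0 : (PySem.Dict.empty : PySem.Dict Int (PySem.Dict String Int)).keys = [] := rfl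
  rw [pv_outerA key lod PySem.Dict.empty (by rw [hkeys0]; exact List.nodup_nil)]
  have hemp : (PySem.Dict.empty : PySem.Dict Int (PySem.Dict String Int)).items = [] := rfl
  rw [hemp, hkeys0, pv_order key lod []]
  simp only [List.map_nil, List.nil_append, List.map_map]
  apply List.map_congr_left
  intro kv _
  simp only [Function.comp_apply]
  rw [pv_scan_filter key kv lod]
  obtain ⟨h1, h2⟩ := pv_acc_inv key (lod.filter (fun dct0 => pvKey key dct0 == kv))
    PySem.Dict.empty rfl List.nodup_nil
  rw [pv_rebuild key kv (pvAcc key kv lod PySem.Dict.empty) h1 h2]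
  have hmk : (PySem.Dict.empty.insert key kv : PySem.Dict String Int) =
      PySem.Dict.mk ((key, kv) :: (PySem.Dict.empty : PySem.Dict String Int).items) := rfl
  rw [hmk, pv_acc_cons key kv]
  rfl
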